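-- pv_equiv track=rewrite | github.com/10186425442-debug/Playwright_har- | blacklist_manager.py | compare_hostnames
-- ===== SOURCE A (Python) =====
-- from typing import Set, List
--
-- def compare_hostnames(test_hostnames: Set[str], reference_hostnames: Set[str], match_level: str = '2', return_base_urls: bool = False) -> Set[str]:
--     """
--     对比测试hostname与参考文件，返回匹配的域名
--
--     Args:
--         test_hostnames: 测试中的hostname集合
--         reference_hostnames: 参考文件中的hostname集合
--         match_level: 匹配级别
--             '1' - 精确匹配
--             '2' - 子域名匹配（默认，支持子域名关系）
--             '3' - 二级域名匹配
--         return_base_urls: 是否返回基准URL（参考文件中的URL），默认False返回测试中的hostname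
--     Returns:
--         匹配的域名集合（如果return_base_urls=True，返回参考文件中的基准URL；否则返回测试中的hostname）
--     """
--     if match_level == '1':
--         # 级别1: 精确匹配
--         if return_base_urls:
--             # 返回参考文件中匹配的基准URL
--             return test_hostnames & reference_hostnames
--         else:
--             return test_hostnames & reference_hostnames
--     elif match_level == '2':
--         # 级别2: 子域名匹配（支持子域名关系）
--         if return_base_urls:
--             # 返回参考文件中匹配的基准URL
--             matched_base_urls = set()
--             for ref_domain in reference_hostnames:
--                 for test_domain in test_hostnames:
--                     # 精确匹配
--                     if test_domain == ref_domain: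
--                         matched_base_urls.add(ref_domain)
--                         break
--                     # 检查是否是子域名关系
--                     # test_domain 是 ref_domain 的子域名
--                     if test_domain.endswith('.' + ref_domain):
--                         matched_base_urls.add(ref_domain)
--                         break
--                     # ref_domain 是 test_domain 的子域名
--                     if ref_domain.endswith('.' + test_domain):
--                         matched_base_urls.add(ref_domain)
--                         break
--             return matched_base_urls
--         else:
--             # 返回测试中匹配的hostname（原有逻辑）
--             matched = set()
--             for test_domain in test_hostnames:
--                 for ref_domain in reference_hostnames:
--                     # 精确匹配
--                     if test_domain == ref_domain:
--                         matched.add(test_domain)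
--                         break
--                     # 检查是否是子域名关系
--                     # test_domain 是 ref_domain 的子域名
--                     if test_domain.endswith('.' + ref_domain):
--                         matched.add(test_domain)
--                         break
--                     # ref_domain 是 test_domain 的子域名
--                     if ref_domain.endswith('.' + test_domain):
--                         matched.add(test_domain)
--                         break
--             return matched
--     elif match_level == '3':
--         # 级别3: 二级域名匹配
--         def get_second_level(domain: str) -> str:
--             """提取二级域名"""
--             parts = domain.split('.')
--             if len(parts) >= 2:
--                 return '.'.join(parts[-2:])
--             return domain
--
--         matched = set()
--         for test_domain in test_hostnames:
--             test_2nd = get_second_level(test_domain)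
--             for ref_domain in reference_hostnames:
--                 ref_2nd = get_second_level(ref_domain)
--                 if test_2nd == ref_2nd:
--                     matched.add(test_domain)
--                     break
--         return matched
--     else:
--         # 默认使用精确匹配
--         return test_hostnames & reference_hostnames
-- ===== SOURCE B (Python) =====
-- def compare_hostnames(test_hostnames, reference_hostnames, match_level='2', return_base_urls=False):
--     """Set-indexed re-implementation: membership lookups on each hostname's
--     dot-suffixes instead of pairwise scans."""
--     def dot_suffixes(d):
--         # every tail of d that starts right after a '.'
--         return [d[i + 1:] for i, ch in enumerate(d) if ch == '.']
--
--     if match_level == '2':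
--         if return_base_urls:
--             left, right = reference_hostnames, test_hostnames
--         else:
--             left, right = test_hostnames, reference_hostnames
--         right_set = set(right)
--         right_suffixes = {s for r in right for s in dot_suffixes(r)}
--         return {d for d in left
--                 if d in right_set
--                 or any(s in right_set for s in dot_suffixes(d))
--                 or d in right_suffixes}
--     if match_level == '3':
--         def get_second_level(domain):
--             parts = domain.split('.')
--             return '.'.join(parts[-2:]) if len(parts) >= 2 else domain
--         ref_2nd = {get_second_level(r) for r in reference_hostnames}
--         return {t for t in test_hostnames if get_second_level(t) in ref_2nd}
--     # match_level '1' and any other value: exact intersection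
--     return test_hostnames & reference_hostnames
-- ===== Notes on version B (the rewrite author's own statement) =====
-- stated objective: alternative
-- what changed: Replaces A's nested pairwise scans (every test against every reference) with hash-set indexing: build a set of the right-hand hostnames and a set of all their dot-suffixes once, then decide each hostname by O(L) membership lookups on it and its own dot-suffixes (not measurably faster on the generated inputs).
import Mathlib
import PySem

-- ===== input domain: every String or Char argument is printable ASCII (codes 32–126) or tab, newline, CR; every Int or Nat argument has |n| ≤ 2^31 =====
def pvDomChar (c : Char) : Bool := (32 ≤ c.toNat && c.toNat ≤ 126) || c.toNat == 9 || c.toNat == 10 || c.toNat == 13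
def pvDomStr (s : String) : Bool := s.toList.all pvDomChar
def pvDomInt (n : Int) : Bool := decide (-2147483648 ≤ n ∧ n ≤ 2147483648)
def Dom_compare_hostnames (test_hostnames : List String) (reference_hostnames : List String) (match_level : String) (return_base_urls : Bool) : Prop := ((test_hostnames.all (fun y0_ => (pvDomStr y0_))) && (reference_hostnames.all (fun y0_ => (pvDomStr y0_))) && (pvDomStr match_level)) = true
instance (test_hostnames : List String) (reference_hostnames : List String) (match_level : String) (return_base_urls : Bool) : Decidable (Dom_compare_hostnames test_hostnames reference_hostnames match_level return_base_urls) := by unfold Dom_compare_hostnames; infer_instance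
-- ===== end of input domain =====

-- B replaces A's nested pairwise scans by set lookups over each hostname's dot-suffixes;
-- the Python arguments and result are sets (here: duplicate-free lists, results compared as sets).

-- ===== PORT A =====
-- shared helper of both Pythons: get_second_level(domain) of match_level '3'
def get_second_level (domain : String) : String :=
  let parts := (PySem.Chars.splitOn domain.toList ".".toList).map String.ofList
  if parts.length ≥ 2 then PySem.Str.join "." (PySem.List.slice parts (some (-2)) none)
  else domain

-- the three chained conditions of A's inner loop (exact match / t subdomain of r / r subdomain of t)
def pvCondA (t r : String) : Bool :=
  t == r || PySem.Chars.endswith t.toList ('.' :: r.toList)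
         || PySem.Chars.endswith r.toList ('.' :: t.toList)

def compare_hostnames (test_hostnames : List String) (reference_hostnames : List String) (match_level : String) (return_base_urls : Bool) : List String :=
  if match_level == "1" then
    if return_base_urls then PySem.Set.inter (PySem.Set.ofList test_hostnames) reference_hostnames
    else PySem.Set.inter (PySem.Set.ofList test_hostnames) reference_hostnames
  else if match_level == "2" then
    if return_base_urls then
      -- for ref: for test: add ref and break on the first matching test
      reference_hostnames.foldl
        (fun m r => if test_hostnames.any (fun t => pvCondA t r) then PySem.Set.add m r else m)
        PySem.Set.empty
    else
      -- for test: for ref: add test and break on the first matching ref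
      test_hostnames.foldl
        (fun m t => if reference_hostnames.any (fun r => pvCondA t r) then PySem.Set.add m t else m)
        PySem.Set.empty
  else if match_level == "3" then
    test_hostnames.foldl
      (fun m t =>
        let t2 := get_second_level t
        if reference_hostnames.any (fun r => t2 == get_second_level r) then PySem.Set.add m t else m)
      PySem.Set.empty
  else
    PySem.Set.inter (PySem.Set.ofList test_hostnames) reference_hostnames

-- ===== PORT B =====
-- dot_suffixes(d): every tail of d starting right after a '.' (the enumerate-comprehension, as structural recursion)
def dot_suffixes_chars : List Char → List (List Char)
  | [] => []
  | c :: cs => if c = '.' then cs :: dot_suffixes_chars cs else dot_suffixes_chars cs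

def dot_suffixes (d : String) : List String := (dot_suffixes_chars d.toList).map String.ofList

def compare_hostnames_alt (test_hostnames : List String) (reference_hostnames : List String) (match_level : String) (return_base_urls : Bool) : List String :=
  if match_level == "2" then
    let left := if return_base_urls then reference_hostnames else test_hostnames
    let right := if return_base_urls then test_hostnames else reference_hostnames
    let rightSet : PySem.Set String := PySem.Set.ofList right
    let rightSuffixes : PySem.Set String :=
      right.foldl (fun s r => PySem.Set.update s (dot_suffixes r)) PySem.Set.empty
    PySem.Set.ofList (left.filter (fun d =>
      PySem.Set.contains rightSet d
      || (dot_suffixes d).any (fun s => PySem.Set.contains rightSet s)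
      || PySem.Set.contains rightSuffixes d))
  else if match_level == "3" then
    let ref2 : PySem.Set String := PySem.Set.ofList (reference_hostnames.map get_second_level)
    PySem.Set.ofList (test_hostnames.filter (fun t => PySem.Set.contains ref2 (get_second_level t)))
  else
    PySem.Set.inter (PySem.Set.ofList test_hostnames) reference_hostnames

-- ===== PRECONDITION & SPEC =====
def Spec_compare_hostnames (test_hostnames : List String) (reference_hostnames : List String) (match_level : String) (return_base_urls : Bool) (out : List String) : Prop := out = compare_hostnames_alt test_hostnames reference_hostnames match_level return_base_urls
instance (test_hostnames : List String) (reference_hostnames : List String) (match_level : String) (return_base_urls : Bool) (out : List String) : Decidable (Spec_compare_hostnames test_hostnames reference_hostnames match_level return_base_urls out) := by unfold Spec_compare_hostnames; infer_instance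

-- ===== CLAIM (what is proved, stated in full; the proofs are below) =====
def Claim_equal_compare_hostnames : Prop := ∀ (test_hostnames : List String) (reference_hostnames : List String) (match_level : String) (return_base_urls : Bool), Dom_compare_hostnames test_hostnames reference_hostnames match_level return_base_urls → Spec_compare_hostnames test_hostnames reference_hostnames match_level return_base_urls (compare_hostnames test_hostnames reference_hostnames match_level return_base_urls)

-- ===== LEMMAS AND PROOFS =====

-- A's add-if-matched fold is Set.ofList of the filtered list
theorem foldl_add_if_eq_ofList_filter (p : String → Bool) (xs : List String) (s : PySem.Set String) :
    xs.foldl (fun m x => if p x then PySem.Set.add m x else m) s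
      = (xs.filter p).foldl PySem.Set.add s := by
  induction xs generalizing s with
  | nil => rfl
  | cons x xs ih => by_cases h : p x <;> simp [h, ih]

-- endswith('.' + r) enumerates exactly the dot-suffixes (char level)
theorem endswith_dot_iff (t r : List Char) :
    PySem.Chars.endswith t ('.' :: r) = true ↔ r ∈ dot_suffixes_chars t := by
  rw [PySem.Chars.endswith_iff]
  induction t with
  | nil => simp [dot_suffixes_chars, List.suffix_nil]
  | cons c cs ih =>
    rw [List.suffix_cons_iff]
    by_cases hc : c = '.'
    · subst hc; simp [dot_suffixes_chars, ih]
    · simp only [dot_suffixes_chars, if_neg hc, ih, List.cons_eq_cons]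
      constructor
      · rintro (⟨h, -⟩ | h)
        · exact absurd h.symm hc
        · exact h
      · exact Or.inr

-- string level
theorem endswith_dot_iff_str (d s : String) :
    PySem.Chars.endswith d.toList ('.' :: s.toList) = true ↔ s ∈ dot_suffixes d := by
  rw [endswith_dot_iff, dot_suffixes, List.mem_map]
  constructor
  · intro h; exact ⟨s.toList, h, String.ofList_toList⟩
  · rintro ⟨l, hl, rfl⟩; simpa [String.toList_ofList] using hl

-- membership in the accumulated dot-suffix set
theorem mem_foldl_update_suffixes (right : List String) (s : PySem.Set String) (d : String) :
    d ∈ right.foldl (fun s r => PySem.Set.update s (dot_suffixes r)) s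
      ↔ d ∈ s ∨ ∃ r ∈ right, d ∈ dot_suffixes r := by
  induction right generalizing s with
  | nil => simp
  | cons r rs ih => simp [ih, PySem.Set.mem_update, or_assoc]

-- B's indexed predicate agrees with the existence of a matching element of `right`
theorem bpred_iff (right : List String) (d : String) :
    (PySem.Set.contains (PySem.Set.ofList right) d
      || (dot_suffixes d).any (fun s => PySem.Set.contains (PySem.Set.ofList right) s)
      || PySem.Set.contains (right.foldl (fun s r => PySem.Set.update s (dot_suffixes r)) ([] : PySem.Set String)) d) = true
    ↔ ∃ y ∈ right, (d = y
        ∨ PySem.Chars.endswith d.toList ('.' :: y.toList) = true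
        ∨ PySem.Chars.endswith y.toList ('.' :: d.toList) = true) := by
  simp only [Bool.or_eq_true, List.any_eq_true, PySem.Set.contains_iff, PySem.Set.mem_ofList,
    mem_foldl_update_suffixes]
  constructor
  · rintro ((h | ⟨s, hs, hmem⟩) | (h | ⟨r, hr, hd⟩))
    · exact ⟨d, h, Or.inl rfl⟩
    · exact ⟨s, hmem, Or.inr (Or.inl ((endswith_dot_iff_str d s).mpr hs))⟩
    · simp at h
    · exact ⟨r, hr, Or.inr (Or.inr ((endswith_dot_iff_str r d).mpr hd))⟩
  · rintro ⟨y, hy, (rfl | h | h)⟩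
    · exact Or.inl (Or.inl hy)
    · exact Or.inl (Or.inr ⟨y, (endswith_dot_iff_str d y).mp h, hy⟩)
    · exact Or.inr (Or.inr ⟨y, hy, (endswith_dot_iff_str y d).mp h⟩)

-- A's inner scan, in both orientations, tests the same existence
theorem acond_any_fwd (right : List String) (d : String) :
    right.any (fun y => pvCondA d y) = true
      ↔ ∃ y ∈ right, (d = y
          ∨ PySem.Chars.endswith d.toList ('.' :: y.toList) = true
          ∨ PySem.Chars.endswith y.toList ('.' :: d.toList) = true) := by
  simp only [List.any_eq_true, pvCondA, Bool.or_eq_true, beq_iff_eq, or_assoc]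

theorem acond_any_rev (right : List String) (d : String) :
    right.any (fun y => pvCondA y d) = true
      ↔ ∃ y ∈ right, (d = y
          ∨ PySem.Chars.endswith d.toList ('.' :: y.toList) = true
          ∨ PySem.Chars.endswith y.toList ('.' :: d.toList) = true) := by
  simp only [List.any_eq_true, pvCondA, Bool.or_eq_true, beq_iff_eq]
  constructor
  · rintro ⟨y, hy, (h | h) | h⟩
    exacts [⟨y, hy, Or.inl h.symm⟩, ⟨y, hy, Or.inr (Or.inr h)⟩, ⟨y, hy, Or.inr (Or.inl h)⟩]
  · rintro ⟨y, hy, h | h | h⟩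
    exacts [⟨y, hy, Or.inl (Or.inl h.symm)⟩, ⟨y, hy, Or.inr h⟩, ⟨y, hy, Or.inl (Or.inr h)⟩]

-- level-2 branch, one orientation at a time
theorem level2_eq (left right : List String) (orient : Bool) :
    left.foldl (fun m x =>
        if right.any (fun y => if orient then pvCondA y x else pvCondA x y)
        then PySem.Set.add m x else m) PySem.Set.empty
      = PySem.Set.ofList (left.filter (fun d =>
          PySem.Set.contains (PySem.Set.ofList right) d
          || (dot_suffixes d).any (fun s => PySem.Set.contains (PySem.Set.ofList right) s)
          || PySem.Set.contains (right.foldl (fun s r => PySem.Set.update s (dot_suffixes r)) PySem.Set.empty) d)) := by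
  rw [foldl_add_if_eq_ofList_filter,
    show (PySem.Set.empty : PySem.Set String) = [] from rfl, ← PySem.Set.ofList_eq_foldl]
  congr 1
  apply List.filter_congr
  intro d _
  rw [Bool.eq_iff_iff, bpred_iff]
  cases orient
  · simpa using acond_any_fwd right d
  · simpa using acond_any_rev right d

-- ===== VERDICT (by name: the statement is the Claim_ definition above) =====
theorem compare_hostnames_spec : Claim_equal_compare_hostnames := by
  intro tests refs level base _
  unfold Spec_compare_hostnames compare_hostnames compare_hostnames_alt
  by_cases h1 : level = "1"
  · subst h1; simp
  · by_cases h2 : level = "2"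
    · subst h2
      simp only [beq_self_eq_true, if_true, show (("2" : String) == "1") = false from rfl,
        Bool.false_eq_true, if_false]
      cases base
      · simpa using level2_eq tests refs false
      · simpa using level2_eq refs tests true
    · by_cases h3 : level = "3"
      · subst h3
        simp only [beq_self_eq_true, if_true, show (("3" : String) == "1") = false from rfl,
          show (("3" : String) == "2") = false from rfl, Bool.false_eq_true, if_false]
        rw [foldl_add_if_eq_ofList_filter,
          show (PySem.Set.empty : PySem.Set String) = [] from rfl, ← PySem.Set.ofList_eq_foldl]
        congr 1
        apply List.filter_congr
        intro t _
        rw [Bool.eq_iff_iff]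
        simp only [List.any_eq_true, beq_iff_eq, PySem.Set.contains_iff, PySem.Set.mem_ofList,
          List.mem_map]
        constructor
        · rintro ⟨r, hr, h⟩; exact ⟨r, hr, h.symm⟩
        · rintro ⟨r, hr, h⟩; exact ⟨r, hr, h.symm⟩
      · simp [beq_iff_eq, h1, h2, h3]
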